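-- pv_equiv track=rewrite | github.com/SVCE-ACM/A-December-Of_Algorithms-2024 | Solutions/python3_the-ai-developer_Digit-Manipulation.py | DigitSqrSum
-- ===== SOURCE A (Python) =====
-- def DigitSqrSum(n):
--     def DigitSum(x):
--         square_sum=0
--         while x>0:
--             digit=x%10
--             square_sum+=digit*digit
--             x//=10
--         return square_sum
--     total_sum=0
--     for i in range(1,n+1):
--         total_sum += DigitSum(i)
--     return total_sum
-- ===== SOURCE B (Python) =====
-- def DigitSqrSum(n):
--     # positional block recurrence: O(log^2 n) instead of A's O(n log n)
--     def P(r):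
--         # sum of k*k for k = 0..r
--         return r * (r + 1) * (2 * r + 1) // 6
--
--     def f(x):
--         # digit square sum of x
--         return 0 if x <= 0 else (x % 10) * (x % 10) + f(x // 10)
--
--     def S(m):
--         # sum of f(i) for i = 0..m
--         q, r = m // 10, m % 10
--         if q == 0:
--             return P(r)
--         return 10 * S(q - 1) + 285 * q + (r + 1) * f(q) + P(r)
--
--     return S(n) if n > 0 else 0
-- ===== Notes on version B (the rewrite author's own statement) =====
-- stated objective: faster
-- what changed: A loops over every i in 1..n and sums its squared digits with an inner digit loop; B computes the same total with a decimal block recurrence (each block of ten numbers contributes a constant plus ten copies of the prefix's digit-square sum), recursing on n's quotient instead of visiting each number.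
import Mathlib
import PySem

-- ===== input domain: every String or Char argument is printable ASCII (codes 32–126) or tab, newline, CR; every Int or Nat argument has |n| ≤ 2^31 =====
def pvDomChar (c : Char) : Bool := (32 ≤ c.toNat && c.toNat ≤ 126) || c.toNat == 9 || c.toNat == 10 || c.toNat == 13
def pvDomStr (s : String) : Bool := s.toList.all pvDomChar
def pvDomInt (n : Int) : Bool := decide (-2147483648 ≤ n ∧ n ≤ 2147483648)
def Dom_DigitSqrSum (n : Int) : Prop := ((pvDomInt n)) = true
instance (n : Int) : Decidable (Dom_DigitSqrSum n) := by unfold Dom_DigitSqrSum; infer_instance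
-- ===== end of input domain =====

-- B replaces A's per-number digit loop over 1..n by a positional block recurrence
-- (objective: faster, O(log^2 n) arithmetic steps instead of O(n log n)).

-- ===== PORT A =====
-- inner 'while x > 0' loop of DigitSum, with accumulator square_sum
def digitSumGo (x : Int) (acc : Int) : Int :=
  if _h : x > 0 then
    digitSumGo (PySem.Int.floordiv x 10) (acc + (PySem.Int.mod x 10) * (PySem.Int.mod x 10))
  else acc
termination_by x.toNat
decreasing_by
  rw [PySem.Int.floordiv_eq_ediv_of_pos (by omega : (0:Int) < 10)]
  omega

def DigitSqrSum (n : Int) : Int :=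
  (PySem.List.pyRange 1 (n + 1) 1).foldl (fun total_sum i => total_sum + digitSumGo i 0) 0

-- ===== PORT B =====
-- P(r) = sum of k*k for k = 0..r
def pvP (r : Int) : Int := PySem.Int.floordiv (r * (r + 1) * (2 * r + 1)) 6

-- f(x) = digit square sum of x
def pvF (x : Int) : Int :=
  if x ≤ 0 then 0
  else (PySem.Int.mod x 10) * (PySem.Int.mod x 10) + pvF (PySem.Int.floordiv x 10)
termination_by x.toNat
decreasing_by
  rw [PySem.Int.floordiv_eq_ediv_of_pos (by omega : (0:Int) < 10)]
  omega

-- S(m) = sum of f(i) for i = 0..m  (Python's S is only called with m ≥ 1;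
-- the 'm < 0 → 0' guard only makes the recursion total in Lean, it is never reached)
def pvS (m : Int) : Int :=
  if _hm : m < 0 then 0
  else if _hq : PySem.Int.floordiv m 10 = 0 then pvP (PySem.Int.mod m 10)
  else
    10 * pvS (PySem.Int.floordiv m 10 - 1) + 285 * PySem.Int.floordiv m 10
      + (PySem.Int.mod m 10 + 1) * pvF (PySem.Int.floordiv m 10) + pvP (PySem.Int.mod m 10)
termination_by m.toNat
decreasing_by
  simp only [PySem.Int.floordiv_eq_ediv_of_pos (by omega : (0:Int) < 10)] at *
  omega

def DigitSqrSum_alt (n : Int) : Int := if n > 0 then pvS n else 0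

-- ===== PRECONDITION & SPEC =====
def Spec_DigitSqrSum (n : Int) (out : Int) : Prop := out = DigitSqrSum_alt n
instance (n : Int) (out : Int) : Decidable (Spec_DigitSqrSum n out) := by unfold Spec_DigitSqrSum; infer_instance

-- ===== CLAIM (what is proved, stated in full; the proofs are below) =====
def Claim_equal_DigitSqrSum : Prop := ∀ (n : Int), Dom_DigitSqrSum n → Spec_DigitSqrSum n (DigitSqrSum n)

-- ===== LEMMAS AND PROOFS =====

theorem pvF_nonpos (x : Int) (hx : x ≤ 0) : pvF x = 0 := by
  unfold pvF; simp [hx]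

-- digit split: f(10*j + k) = k*k + f(j) for a digit k
theorem pvF_split (j k : Nat) (hk : k < 10) :
    pvF ((10 * j + k : Nat) : Int) = (k : Int) * (k : Int) + pvF (j : Int) := by
  by_cases h0 : 10 * j + k = 0
  · have hj : j = 0 := by omega
    have hk0 : k = 0 := by omega
    subst hj; subst hk0
    simp [pvF_nonpos]
  · rw [pvF]
    have hpos : ¬ ((10 * j + k : Nat) : Int) ≤ 0 := by
      push_cast; omega
    simp only [hpos, if_false]
    rw [PySem.Int.mod_eq_emod_of_pos (by omega : (0:Int) < 10),
        PySem.Int.floordiv_eq_ediv_of_pos (by omega : (0:Int) < 10)]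
    have hm : ((10 * j + k : Nat) : Int) % 10 = (k : Int) := by push_cast; omega
    have hd : ((10 * j + k : Nat) : Int) / 10 = (j : Int) := by push_cast; omega
    rw [hm, hd]

-- A's while-loop computes acc + f(x)
theorem digitSumGo_eq (x acc : Int) : digitSumGo x acc = acc + pvF x := by
  induction x, acc using digitSumGo.induct with
  | case1 x acc h ih =>
    rw [digitSumGo, pvF]
    simp only [h, dif_pos, if_neg (by omega : ¬ x ≤ 0)]
    rw [ih]
    ring
  | case2 x acc h =>
    rw [digitSumGo]
    simp [h, pvF_nonpos x (by omega)]

-- sum of k*k over a single decimal block of ten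
theorem sum_block (j : Nat) :
    ∑ k ∈ Finset.range 10, pvF ((10 * j + k : Nat) : Int) = 285 + 10 * pvF (j : Int) := by
  rw [Finset.sum_congr rfl
      (fun k hk => pvF_split j k (Finset.mem_range.mp hk))]
  rw [Finset.sum_add_distrib, Finset.sum_const, Finset.card_range]
  norm_num [Finset.sum_range_succ]

-- the full diagonal blocks 0..10q-1
theorem sum_blocks (q : Nat) :
    ∑ i ∈ Finset.range (10 * q), pvF (i : Int)
      = 285 * q + 10 * ∑ j ∈ Finset.range q, pvF (j : Int) := by
  induction q with
  | zero => simp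
  | succ q ih =>
    have h : 10 * (q + 1) = 10 * q + 10 := by ring
    rw [h, Finset.sum_range_add, ih, sum_block q, Finset.sum_range_succ]
    push_cast
    ring

-- closed form of P on single-digit r
theorem pvP_eq_sum (r : Nat) (hr : r < 10) :
    pvP (r : Nat) = ∑ k ∈ Finset.range (r + 1), ((k : Int) * (k : Int)) := by
  interval_cases r <;> decide

-- main invariant: S(m) = sum of f(i) for i = 0..m
theorem pvS_eq_sum (m : Nat) :
    pvS (m : Int) = ∑ i ∈ Finset.range (m + 1), pvF (i : Int) := by
  induction m using Nat.strong_induction_on with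
  | _ m ih =>
    rw [pvS]
    have hm : ¬ ((m : Int) < 0) := by omega
    have hqc : PySem.Int.floordiv (m : Int) 10 = ((m / 10 : Nat) : Int) := by
      rw [PySem.Int.floordiv_eq_ediv_of_pos (by omega : (0:Int) < 10)]; omega
    have hrc : PySem.Int.mod (m : Int) 10 = ((m % 10 : Nat) : Int) := by
      rw [PySem.Int.mod_eq_emod_of_pos (by omega : (0:Int) < 10)]; omega
    simp only [hm, dif_neg, not_false_iff]
    rw [hqc, hrc]
    by_cases hq : m / 10 = 0
    · have hlt : m < 10 := by omega
      simp only [hq, Nat.cast_zero]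
      have hmod : m % 10 = m := by omega
      rw [hmod, pvP_eq_sum m hlt]
      refine Finset.sum_congr rfl (fun k hk => ?_)
      have hk10 : k < 10 := by
        have := Finset.mem_range.mp hk; omega
      have hsp := pvF_split 0 k hk10
      have h0 : pvF ((0 : Nat) : Int) = 0 := pvF_nonpos _ (by simp)
      rw [h0, add_zero] at hsp
      simpa using hsp.symm
    · have hq1 : 1 ≤ m / 10 := by omega
      have hm10 : 10 ≤ m := by omega
      set q := m / 10 with hqdef
      set r := m % 10 with hrdef
      have hqne : ((q : Nat) : Int) ≠ 0 := by
        simpa using hq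
      simp only [dif_neg hqne]
      have hcast : ((q : Nat) : Int) - 1 = ((q - 1 : Nat) : Int) := by
        push_cast [Nat.cast_sub hq1]; ring
      have hq1' : q - 1 + 1 = q := by omega
      have hsplit : m + 1 = 10 * q + (r + 1) := by omega
      rw [hcast, ih (q - 1) (by omega), hq1', hsplit, Finset.sum_range_add, sum_blocks q]
      have hblockr : ∑ k ∈ Finset.range (r + 1), pvF ((10 * q + k : Nat) : Int)
          = (∑ k ∈ Finset.range (r + 1), ((k : Int) * (k : Int))) + (r + 1) * pvF (q : Int) := by
        rw [Finset.sum_congr rfl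
            (fun k hk => pvF_split q k (by have := Finset.mem_range.mp hk; omega))]
        rw [Finset.sum_add_distrib, Finset.sum_const, Finset.card_range]
        ring
      rw [hblockr, ← pvP_eq_sum r (by omega)]
      ring

-- bridging List.range sums to Finset.range sums
theorem list_sum_range (N : Nat) (f : Nat → Int) :
    ((List.range N).map f).sum = ∑ i ∈ Finset.range N, f i := by
  induction N with
  | zero => simp
  | succ N ih => rw [List.range_succ, Finset.sum_range_succ]; simp [ih]

-- ===== VERDICT (by name: the statement is the Claim_ definition above) =====
theorem DigitSqrSum_spec : Claim_equal_DigitSqrSum := by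
  intro n _
  unfold Spec_DigitSqrSum DigitSqrSum DigitSqrSum_alt
  by_cases hn : n > 0
  · simp only [hn, if_pos]
    rw [PySem.List.pyRange_one, PySem.List.foldl_add _ (fun i => digitSumGo i 0) 0]
    have h1 : ((n + 1) - 1).toNat = n.toNat := by omega
    rw [h1, List.map_map, list_sum_range n.toNat _]
    have h2 : ∀ k ∈ Finset.range n.toNat,
        ((fun i => digitSumGo i 0) ∘ fun k : Nat => 1 + (k : Int)) k
          = pvF ((k + 1 : Nat) : Int) := by
      intro k _
      simp only [Function.comp]
      rw [digitSumGo_eq, zero_add]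
      congr 1
      omega
    rw [Finset.sum_congr rfl h2]
    have hN : n = ((n.toNat : Nat) : Int) := by omega
    conv_rhs => rw [hN]
    rw [pvS_eq_sum n.toNat, Finset.sum_range_succ']
    simp
    exact pvF_nonpos 0 le_rfl
  · simp only [hn, if_neg, not_false_iff]
    rw [PySem.List.pyRange_one_eq_nil (by omega : n + 1 ≤ 1)]
    rfl
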